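-- pv_equiv track=rewrite | github.com/OmkarPathak/CCDSAP-Prep | Codechef_Prep/arrays/programs_on_array/RAINBOWA.py | get_rainbow_array
-- ===== SOURCE A (Python) =====
-- def get_rainbow_array(array):
--     start, end = 0, len(array) - 1
--
--     for i in range(1, 8):
--         count = 0
--         while (start <= end) and (array[start] == array[end]) and (array[start] == i):
--             start += 1
--             end -= 1
--             count += 1
--         if count == 0:
--             return 'no'
--     if start < end:
--         return 'no'
--     return 'yes'
-- ===== SOURCE B (Python) =====
-- RAINBOW = [1, 2, 3, 4, 5, 6, 7, 6, 5, 4, 3, 2, 1]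
--
-- def get_rainbow_array(array):
--     if array != array[::-1]:
--         return 'no'
--     values = []
--     for x in array:
--         if not values or values[-1] != x:
--             values.append(x)
--     return 'yes' if values == RAINBOW else 'no'
-- ===== Notes on version B (the rewrite author's own statement) =====
-- stated objective: alternative
-- what changed: Replaces the two-pointer inward peel over seven values by a palindrome test plus one forward run-length pass whose value sequence is compared with the fixed pattern [1,2,3,4,5,6,7,6,5,4,3,2,1].
-- intended difference: On odd-length palindromes that are a valid rainbow except for a single non-7 element at the exact center (e.g. [1,2,3,4,5,6,7,9,7,6,5,4,3,2,1]) A returns 'yes' because its final check 'start < end' lets one never-examined middle element through, while B returns 'no', the intended answer since such arrays are not rainbow arrays. — e.g. on get_rainbow_array([1, 2, 3, 4, 5, 6, 7, 9, 7, 6, 5, 4, 3, 2, 1]): A returns "yes", B returns "no"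
import Mathlib
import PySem

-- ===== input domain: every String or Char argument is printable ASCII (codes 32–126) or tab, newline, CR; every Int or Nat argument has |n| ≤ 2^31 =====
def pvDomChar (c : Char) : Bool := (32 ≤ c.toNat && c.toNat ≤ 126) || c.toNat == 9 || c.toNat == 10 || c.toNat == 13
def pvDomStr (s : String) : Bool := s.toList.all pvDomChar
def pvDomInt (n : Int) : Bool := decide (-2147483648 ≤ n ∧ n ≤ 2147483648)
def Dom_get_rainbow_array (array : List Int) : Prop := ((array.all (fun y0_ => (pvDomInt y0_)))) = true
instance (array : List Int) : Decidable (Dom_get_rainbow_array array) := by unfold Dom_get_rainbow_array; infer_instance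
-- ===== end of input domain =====

-- B replaces A's two-pointer inward peel by a palindrome test plus one run-length pass compared
-- with the fixed rainbow pattern; the two agree everywhere except on the D_ region below, where
-- A's final `start < end` check wrongly accepts a single non-7 middle element.
-- Neither program mutates its argument; the claims are about the return value.

-- ===== PORT A =====
-- the inner `while` loop of A (state: start, end, count)
def pyWhileA (array : List Int) (i s e c : Int) : Int × Int × Int :=
  if h : s ≤ e ∧ PySem.List.pyGet? array s = PySem.List.pyGet? array e ∧
         PySem.List.pyGet? array s = some i then
    pyWhileA array i (s + 1) (e - 1) (c + 1)
  else (s, e, c)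
termination_by (e + 1 - s).toNat
decreasing_by omega

-- the `for i in range(1, 8)` loop with its early `return 'no'`
def loopA (array : List Int) : List Int → Int → Int → String
  | [], s, e => if s < e then "no" else "yes"
  | i :: rest, s, e =>
    let r := pyWhileA array i s e 0
    if r.2.2 = 0 then "no" else loopA array rest r.1 r.2.1

def get_rainbow_array (array : List Int) : String :=
  loopA array (PySem.List.pyRange 1 8 1) 0 (PySem.List.len array - 1)

-- ===== PORT B =====
def get_rainbow_array_alt (array : List Int) : String :=
  if array ≠ array.reverse then "no"
  else
    let values := array.foldl
      (fun acc x => if acc = [] ∨ acc.getLast? ≠ some x then acc ++ [x] else acc) []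
    if values = [1, 2, 3, 4, 5, 6, 7, 6, 5, 4, 3, 2, 1] then "yes" else "no"

-- ===== PRECONDITION & SPEC =====
-- run-length value sequence of a list (used only to STATE the D_ region below)
def runValsAux : Int → List Int → List Int
  | _, [] => []
  | prev, x :: xs => if x = prev then runValsAux x xs else x :: runValsAux x xs

def runVals : List Int → List Int
  | [] => []
  | x :: xs => x :: runValsAux x xs

-- On odd-length palindromes that are a valid rainbow except for a single non-7 element at the
-- exact center (e.g. [1,2,3,4,5,6,7,9,7,6,5,4,3,2,1]) A returns "yes" because its final check
-- `start < end` never examines the middle element, while B returns "no", the intended answer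
-- since such arrays are not rainbow arrays.
def D_get_rainbow_array (array : List Int) : Prop :=
  array.length % 2 = 1 ∧ array.reverse = array ∧ array[array.length / 2]? ≠ some 7 ∧
  runVals (array.take (array.length / 2) ++ array.drop (array.length / 2 + 1)) =
    [1, 2, 3, 4, 5, 6, 7, 6, 5, 4, 3, 2, 1]
instance (array : List Int) : Decidable (D_get_rainbow_array array) := by
  unfold D_get_rainbow_array; infer_instance

def Spec_get_rainbow_array (array : List Int) (out : String) : Prop :=
  ¬ D_get_rainbow_array array → out = get_rainbow_array_alt array
instance (array : List Int) (out : String) : Decidable (Spec_get_rainbow_array array out) := by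
  unfold Spec_get_rainbow_array; infer_instance

def pvDiffWitness_get_rainbow_array : List Int := [1, 2, 3, 4, 5, 6, 7, 9, 7, 6, 5, 4, 3, 2, 1]
def pvDiffWitnessOut_get_rainbow_array : String × String := ("yes", "no")

-- ===== CLAIM (what is proved, stated in full; the proofs are below) =====
def Claim_unchanged_get_rainbow_array : Prop := ∀ (array : List Int), Dom_get_rainbow_array array → Spec_get_rainbow_array array (get_rainbow_array array)
def Claim_changed_get_rainbow_array : Prop := Dom_get_rainbow_array (pvDiffWitness_get_rainbow_array) ∧ D_get_rainbow_array (pvDiffWitness_get_rainbow_array) ∧ get_rainbow_array (pvDiffWitness_get_rainbow_array) = pvDiffWitnessOut_get_rainbow_array.1 ∧ get_rainbow_array_alt (pvDiffWitness_get_rainbow_array) = pvDiffWitnessOut_get_rainbow_array.2 ∧ pvDiffWitnessOut_get_rainbow_array.1 ≠ pvDiffWitnessOut_get_rainbow_array.2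
def Claim_exact_get_rainbow_array : Prop := ∀ (array : List Int), Dom_get_rainbow_array array → D_get_rainbow_array array → get_rainbow_array array ≠ get_rainbow_array_alt array

-- ===== LEMMAS AND PROOFS =====

def peelL (i : Int) : List Int → Nat → List Int × Nat
  | [], c => ([], c)
  | x :: xs, c =>
    if x = i ∧ (x :: xs).getLast? = some i then peelL i xs.dropLast (c + 1) else (x :: xs, c)
termination_by L _ => L.length
decreasing_by simp [List.length_dropLast]

def win (array : List Int) (s e : Int) : List Int := (array.take (e + 1).toNat).drop s.toNat

lemma win_len (array : List Int) (s e : Int) (h0 : 0 ≤ s) (he : e < (array.length : Int)) :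
    (win array s e).length = (e + 1 - s).toNat := by
  simp [win, List.length_drop, List.length_take]
  omega

lemma win_head (array : List Int) (s e : Int) (h0 : 0 ≤ s) (hse : s ≤ e)
    (he : e < (array.length : Int)) :
    (win array s e).head? = PySem.List.pyGet? array s := by
  rw [PySem.List.pyGet?_of_nonneg _ h0]
  rw [win, List.head?_drop, List.getElem?_take_of_lt (by omega)]

lemma win_last (array : List Int) (s e : Int) (h0 : 0 ≤ s) (hse : s ≤ e)
    (he : e < (array.length : Int)) :
    (win array s e).getLast? = PySem.List.pyGet? array e := by
  rw [PySem.List.pyGet?_of_nonneg _ (by omega : (0:Int) ≤ e)]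
  rw [List.getLast?_eq_getElem?, win_len array s e h0 he]
  rw [win, List.getElem?_drop, List.getElem?_take_of_lt (by omega)]
  congr 1
  omega

lemma win_step (array : List Int) (s e : Int) (h0 : 0 ≤ s) (hse : s ≤ e)
    (he : e < (array.length : Int)) :
    win array (s + 1) (e - 1) = (win array s e).tail.dropLast := by
  have h1 : (s + 1).toNat = s.toNat + 1 := by omega
  have h2 : (e - 1 + 1).toNat = e.toNat := by omega
  apply List.ext_getElem?
  intro n
  rw [win, win, List.tail_drop]
  rw [List.getElem?_dropLast, h1, h2]
  rw [List.getElem?_drop, List.getElem?_drop, List.length_drop, List.length_take]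
  by_cases hn : n < (array.take (e+1).toNat).length - (s.toNat + 1) - 1
  · rw [if_pos (by simpa using hn)]
    rw [List.getElem?_take, List.getElem?_take]
    have : s.toNat + 1 + n < e.toNat := by
      simp [List.length_take] at hn; omega
    rw [if_pos (by omega), if_pos (by omega)]
  · rw [if_neg (by simpa using hn)]
    rw [List.getElem?_take]
    rw [if_neg (by simp [List.length_take] at hn ⊢; omega)]


lemma bridge_while (array : List Int) (i : Int) : ∀ (N : Nat) (s e c : Int),
    (e + 1 - s).toNat ≤ N → 0 ≤ s → e < (array.length : Int) →
    ∃ s' e' : Int, ∃ k : Nat, pyWhileA array i s e c = (s', e', c + k) ∧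
      0 ≤ s' ∧ e' < (array.length : Int) ∧
      ∀ n : Nat, peelL i (win array s e) n = (win array s' e', n + k) := by
  intro N
  induction N with
  | zero =>
    intro s e c hN h0 he
    refine ⟨s, e, 0, ?_, h0, he, ?_⟩
    · rw [pyWhileA]; rw [dif_neg (by intro h; omega)]; simp
    · intro n
      have : (win array s e).length = 0 := by rw [win_len array s e h0 he]; omega
      rw [List.length_eq_zero_iff.mp this]
      simp [peelL]
  | succ N ih =>
    intro s e c hN h0 he
    by_cases hc : s ≤ e ∧ PySem.List.pyGet? array s = PySem.List.pyGet? array e ∧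
        PySem.List.pyGet? array s = some i
    · obtain ⟨hse, heq, hi⟩ := hc
      obtain ⟨s', e', k, hw, h0', he', hpe⟩ :=
        ih (s+1) (e-1) (c+1) (by omega) (by omega) (by omega)
      refine ⟨s', e', k + 1, ?_, h0', he', ?_⟩
      · rw [pyWhileA, dif_pos ⟨hse, heq, hi⟩, hw]
        congr 2
        push_cast; ring
      · intro n
        have hlen : 1 ≤ (win array s e).length := by rw [win_len array s e h0 he]; omega
        obtain ⟨x, xs, hx⟩ := List.exists_cons_of_ne_nil
          (List.ne_nil_of_length_pos (by omega) : win array s e ≠ [])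
        have hh := win_head array s e h0 hse he
        have hl := win_last array s e h0 hse he
        rw [hx] at hh hl
        rw [hi] at hh
        simp only [List.head?_cons, Option.some.injEq] at hh
        rw [hx, peelL, if_pos ⟨hh, by rw [hl, ← hi, heq]⟩]
        have hstep : xs.dropLast = win array (s+1) (e-1) := by
          rw [win_step array s e h0 hse he, hx]; rfl
        rw [hstep, hpe (n+1)]
        congr 1
        omega
    · refine ⟨s, e, 0, ?_, h0, he, ?_⟩
      · rw [pyWhileA, dif_neg hc]; simp
      · intro n
        rcases hw : win array s e with _ | ⟨x, xs⟩
        · simp [peelL]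
        · rw [peelL, if_neg, Nat.add_zero]
          intro ⟨hxi, hlast⟩
          apply hc
          have hse : s ≤ e := by
            have := win_len array s e h0 he
            rw [hw] at this; simp at this; omega
          have hh := win_head array s e h0 hse he
          have hl := win_last array s e h0 hse he
          rw [hw] at hh hl
          simp at hh
          refine ⟨hse, ?_, ?_⟩ <;> rw [← hh] <;> rw [hxi] <;> simp [← hl, hlast]


def loopL : List Int → List Int → String
  | [], L => if 2 ≤ L.length then "no" else "yes"
  | i :: rest, L =>
    let r := peelL i L 0
    if r.2 = 0 then "no" else loopL rest r.1

lemma bridge_loop (array : List Int) : ∀ (is : List Int) (s e : Int),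
    0 ≤ s → e < (array.length : Int) →
    loopA array is s e = loopL is (win array s e) := by
  intro is
  induction is with
  | nil =>
    intro s e h0 he
    simp only [loopA, loopL]
    by_cases h : s < e
    · rw [if_pos h, if_pos (by rw [win_len array s e h0 he]; omega)]
    · rw [if_neg h, if_neg (by rw [win_len array s e h0 he]; omega)]
  | cons i rest ih =>
    intro s e h0 he
    obtain ⟨s', e', k, hw, h0', he', hpe⟩ :=
      bridge_while array i (e + 1 - s).toNat s e 0 (le_refl _) h0 he
    simp only [loopA, loopL, hw, hpe 0]
    simp only [Nat.zero_add, Int.zero_add]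
    by_cases hk : k = 0
    · rw [if_pos (by exact_mod_cast hk), if_pos hk]
    · rw [if_neg (by exact_mod_cast hk), if_neg hk]
      exact ih s' e' h0' he'


lemma A_eq_loopL (array : List Int) :
    get_rainbow_array array = loopL [1, 2, 3, 4, 5, 6, 7] array := by
  have h1 : PySem.List.pyRange 1 8 1 = [1, 2, 3, 4, 5, 6, 7] := by decide
  have h2 : win array 0 ((array.length : Int) - 1) = array := by
    simp [win]
  rw [get_rainbow_array, h1, PySem.List.len_eq,
    bridge_loop array _ 0 _ (le_refl _) (by omega), h2]

abbrev rep (v : Int) (n : Nat) : List Int := List.replicate n v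
def shell (v : Int) (n : Nat) (M : List Int) : List Int := rep v n ++ M ++ rep v n

lemma rep_rot (v : Int) (k : Nat) : rep v k ++ [v] = v :: rep v k := by
  rw [← List.replicate_succ', List.replicate_succ]

lemma peel_inv (i : Int) : ∀ (L : List Int) (c : Nat) (L' : List Int) (c' : Nat),
    peelL i L c = (L', c') →
    ∃ k : Nat, c' = c + k ∧
      ((L = shell i k L' ∧ (L' = [] ∨ ¬(L'.head? = some i ∧ L'.getLast? = some i))) ∨
       (L' = [] ∧ L = rep i (2 * k - 1) ∧ 1 ≤ k)) := by
  intro L c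
  induction L, c using peelL.induct i with
  | case1 c =>
    intro L' c' h
    rw [peelL] at h
    injection h with h1 h2
    subst h1; subst h2
    exact ⟨0, by omega, Or.inl ⟨by simp [shell], Or.inl rfl⟩⟩
  | case2 x xs c hcond ih =>
    intro L' c' h
    rw [peelL, if_pos hcond] at h
    obtain ⟨rfl, hlast⟩ := hcond
    rcases List.eq_nil_or_concat xs with rfl | ⟨ys, y, rfl⟩
    · -- L = [x]
      simp only [List.dropLast_nil, peelL] at h
      injection h with h1 h2
      subst h1; subst h2
      exact ⟨1, by omega, Or.inr ⟨rfl, by simp [rep], le_refl 1⟩⟩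
    · -- L = x :: ys ++ [y], and the last element y equals x
      simp only [List.concat_eq_append] at ih h hlast ⊢
      have hy : y = x := by
        rw [← List.cons_append, List.getLast?_concat] at hlast
        simpa using hlast
      subst hy
      rw [List.dropLast_concat] at ih h
      obtain ⟨k, hk, hcase⟩ := ih L' c' h
      refine ⟨k + 1, by omega, ?_⟩
      rcases hcase with ⟨hys, hstop⟩ | ⟨rfl, hys, hk1⟩
      · refine Or.inl ⟨?_, hstop⟩
        rw [hys]
        simp [shell, List.replicate_succ, rep_rot, List.append_assoc]
      · refine Or.inr ⟨rfl, ?_, by omega⟩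
        have h2 : 2 * (k + 1) - 1 = (2 * k - 1) + 1 + 1 := by omega
        rw [hys, h2]
        simp [List.replicate_succ, rep_rot]
  | case3 x xs c hcond =>
    intro L' c' h
    rw [peelL, if_neg hcond] at h
    injection h with h1 h2
    subst h1; subst h2
    refine ⟨0, by omega, Or.inl ⟨by simp [shell], Or.inr ?_⟩⟩
    intro ⟨hh, hl⟩
    simp only [List.head?_cons, Option.some.injEq] at hh
    exact hcond ⟨hh, hl⟩

lemma head?_rep (v : Int) (n : Nat) (h : 1 ≤ n) : (rep v n).head? = some v := by
  cases n with
  | zero => omega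
  | succ m => simp [List.replicate_succ]

lemma head?_shell (v : Int) (n : Nat) (M : List Int) (h : 1 ≤ n) :
    (shell v n M).head? = some v := by
  cases n with
  | zero => omega
  | succ m => simp [shell, List.replicate_succ]

lemma getLast?_cons_concat (x y : Int) (l : List Int) :
    (x :: (l ++ [y])).getLast? = some y := by
  rw [← List.cons_append, List.getLast?_concat]

lemma peel_shell (v : Int) : ∀ (n : Nat) (M : List Int), M.head? ≠ some v → ∀ c : Nat,
    peelL v (shell v n M) c = (M, c + n) := by
  intro n
  induction n with
  | zero =>
    intro M hM c
    simp only [shell, List.replicate, List.nil_append, List.append_nil]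
    cases M with
    | nil => simp [peelL]
    | cons x xs =>
      rw [peelL, if_neg (fun hc => hM (by simp [hc.1]))]
      simp
  | succ n ih =>
    intro M hM c
    have hshape : shell v (n + 1) M = v :: ((rep v n ++ M ++ rep v n) ++ [v]) := by
      simp [shell, List.replicate_succ, rep_rot, List.append_assoc]
    rw [hshape, peelL, if_pos ⟨rfl, getLast?_cons_concat v v _⟩]
    rw [List.dropLast_concat]
    have := ih M hM (c + 1)
    rw [shell] at this
    rw [this]
    congr 1
    omega

lemma peel_rep (v : Int) : ∀ (n : Nat) (c : Nat),
    peelL v (rep v n) c = ([], c + (n + 1) / 2) := by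
  intro n
  induction n using Nat.strong_induction_on with
  | _ n ih =>
    match n with
    | 0 => intro c; simp [rep, peelL]
    | 1 =>
      intro c
      show peelL v [v] c = ([], c + 1)
      rw [peelL, if_pos ⟨rfl, by simp⟩]
      simp [peelL]
    | (m + 2) =>
      intro c
      have hshape : rep v (m + 2) = v :: (rep v m ++ [v]) := by
        simp [List.replicate_succ, rep_rot]
      rw [hshape, peelL, if_pos ⟨rfl, getLast?_cons_concat v v _⟩,
        List.dropLast_concat, ih m (by omega) (c + 1)]
      congr 1
      omega

def shellAll : List (Int × Nat) → List Int → List Int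
  | [], core => core
  | (v, n) :: ps, core => shell v n (shellAll ps core)

lemma head?_shellAll : ∀ (ps : List (Int × Nat)) (core : List Int) (w : Int),
    (∀ p ∈ ps, 1 ≤ p.2) → core.head? = some w →
    (shellAll ps core).head? = some (((ps.map Prod.fst).headD w)) := by
  intro ps
  cases ps with
  | nil => intro core w _ h; simpa [shellAll] using h
  | cons p ps =>
    intro core w hpos _
    obtain ⟨v, n⟩ := p
    simp only [shellAll, List.map_cons, List.headD_cons]
    exact head?_shell v n _ (hpos (v, n) (by simp))

lemma loopL_shellAll : ∀ (ps : List (Int × Nat)) (rest : List Int) (core : List Int) (w : Int),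
    (∀ p ∈ ps, 1 ≤ p.2) → core.head? = some w →
    List.IsChain (· ≠ ·) (ps.map Prod.fst ++ [w]) →
    loopL (ps.map Prod.fst ++ rest) (shellAll ps core) = loopL rest core := by
  intro ps
  induction ps with
  | nil => intro rest core w _ _ _; rfl
  | cons p ps ih =>
    intro rest core w hpos hcore hch
    obtain ⟨v, n⟩ := p
    have hne : (shellAll ps core).head? ≠ some v := by
      rw [head?_shellAll ps core w (fun q hq => hpos q (by simp [hq])) hcore]
      rcases ps with _ | ⟨q, qs⟩
      · have : v ≠ w := by simpa using hch
        simpa using fun h => this h.symm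
      · have : v ≠ q.1 := (List.isChain_cons_cons.mp (by simpa using hch)).1
        simpa using fun h => this h.symm
    simp only [shellAll, List.map_cons, List.cons_append, loopL]
    rw [peel_shell v n _ hne 0]
    have hn : 1 ≤ n := hpos (v, n) (by simp)
    rw [if_neg (by simp; omega)]
    exact ih rest core w (fun q hq => hpos q (by simp [hq])) hcore
      (List.IsChain.of_cons (by simpa using hch))

lemma loopL_cons_yes (i : Int) (rest : List Int) (L : List Int)
    (h : loopL (i :: rest) L = "yes") :
    ∃ L' k, peelL i L 0 = (L', k) ∧ 1 ≤ k ∧ loopL rest L' = "yes" := by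
  rcases e : peelL i L 0 with ⟨L', k⟩
  rw [loopL] at h
  simp only [e] at h
  by_cases hk : k = 0
  · rw [if_pos hk] at h; exact absurd h (by simp)
  · rw [if_neg hk] at h; exact ⟨L', k, rfl, by omega, h⟩

lemma loopL_nil_no (i : Int) (rest : List Int) : loopL (i :: rest) [] = "no" := by
  simp [loopL, peelL]

lemma step_mid (i j : Int) (rest : List Int) (L : List Int)
    (h : loopL (i :: j :: rest) L = "yes") :
    ∃ k L', 1 ≤ k ∧ L = shell i k L' ∧ L' ≠ [] ∧ loopL (j :: rest) L' = "yes" := by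
  obtain ⟨L', k, hp, hk, hrest⟩ := loopL_cons_yes i _ L h
  have hne : L' ≠ [] := by
    intro rfl'
    rw [rfl', loopL_nil_no] at hrest
    exact absurd hrest (by simp)
  obtain ⟨k', hk', hcase⟩ := peel_inv i L 0 L' k hp
  rcases hcase with ⟨hL, _⟩ | ⟨hnil, _, _⟩
  · exact ⟨k', L', by omega, hL, hne, hrest⟩
  · exact absurd hnil hne

lemma step_last (i : Int) (L : List Int) (h : loopL [i] L = "yes") :
    ∃ k, 1 ≤ k ∧
      (L = rep i (2 * k) ∨ (∃ x, x ≠ i ∧ L = shell i k [x]) ∨ L = rep i (2 * k - 1)) := by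
  obtain ⟨L', k, hp, hk, hrest⟩ := loopL_cons_yes i _ L h
  have hlen : L'.length ≤ 1 := by
    by_contra hlen
    rw [loopL, if_pos (by omega)] at hrest
    exact absurd hrest (by simp)
  obtain ⟨k', hk', hcase⟩ := peel_inv i L 0 L' k hp
  rcases hcase with ⟨hL, hstop⟩ | ⟨_, hL, hk1⟩
  · rcases L' with _ | ⟨x, _ | _⟩
    · refine ⟨k', by omega, Or.inl ?_⟩
      rw [hL, shell, two_mul]
      simp only [List.append_nil]
      exact (List.replicate_add k' k' i).symm
    · refine ⟨k', by omega, Or.inr (Or.inl ⟨x, ?_, hL⟩)⟩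
      rcases hstop with h' | h'
      · exact absurd h' (by simp)
      · intro hx; exact h' (by simp [hx])
    · simp at hlen
  · exact ⟨k', by omega, Or.inr (Or.inr hL)⟩

def Pat (L : List Int) : Prop :=
  ∃ a1 a2 a3 a4 a5 a6 c : Nat,
    (1 ≤ a1 ∧ 1 ≤ a2 ∧ 1 ≤ a3 ∧ 1 ≤ a4 ∧ 1 ≤ a5 ∧ 1 ≤ a6 ∧ 1 ≤ c) ∧
    L = shell 1 a1 (shell 2 a2 (shell 3 a3 (shell 4 a4 (shell 5 a5 (shell 6 a6 (rep 7 c))))))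

def Dsh (L : List Int) : Prop :=
  ∃ a1 a2 a3 a4 a5 a6 c : Nat, ∃ x : Int,
    (1 ≤ a1 ∧ 1 ≤ a2 ∧ 1 ≤ a3 ∧ 1 ≤ a4 ∧ 1 ≤ a5 ∧ 1 ≤ a6 ∧ 1 ≤ c) ∧ x ≠ 7 ∧
    L = shell 1 a1 (shell 2 a2 (shell 3 a3 (shell 4 a4 (shell 5 a5 (shell 6 a6 (shell 7 c [x]))))))

lemma A_yes_iff (L : List Int) : loopL [1, 2, 3, 4, 5, 6, 7] L = "yes" ↔ Pat L ∨ Dsh L := by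
  constructor
  · intro h
    obtain ⟨a1, L1, h1, hL1, hne1, h⟩ := step_mid 1 2 _ L h
    obtain ⟨a2, L2, h2, hL2, hne2, h⟩ := step_mid 2 3 _ L1 h
    obtain ⟨a3, L3, h3, hL3, hne3, h⟩ := step_mid 3 4 _ L2 h
    obtain ⟨a4, L4, h4, hL4, hne4, h⟩ := step_mid 4 5 _ L3 h
    obtain ⟨a5, L5, h5, hL5, hne5, h⟩ := step_mid 5 6 _ L4 h
    obtain ⟨a6, L6, h6, hL6, hne6, h⟩ := step_mid 6 7 _ L5 h
    obtain ⟨k, hk, hcase⟩ := step_last 7 L6 h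
    subst hL1 hL2 hL3 hL4 hL5 hL6
    rcases hcase with hL | ⟨x, hx, hL⟩ | hL
    · exact Or.inl ⟨a1, a2, a3, a4, a5, a6, 2 * k,
        ⟨h1, h2, h3, h4, h5, h6, by omega⟩, by rw [hL]⟩
    · exact Or.inr ⟨a1, a2, a3, a4, a5, a6, k, x,
        ⟨h1, h2, h3, h4, h5, h6, hk⟩, hx, by rw [hL]⟩
    · exact Or.inl ⟨a1, a2, a3, a4, a5, a6, 2 * k - 1,
        ⟨h1, h2, h3, h4, h5, h6, by omega⟩, by rw [hL]⟩
  · intro h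
    rcases h with ⟨a1, a2, a3, a4, a5, a6, c, ⟨p1, p2, p3, p4, p5, p6, pc⟩, hL⟩ |
      ⟨a1, a2, a3, a4, a5, a6, c, x, ⟨p1, p2, p3, p4, p5, p6, pc⟩, hx, hL⟩
    · have hs : L = shellAll [(1, a1), (2, a2), (3, a3), (4, a4), (5, a5), (6, a6)] (rep 7 c) := by
        rw [hL]; rfl
      rw [hs]
      have : loopL ([1, 2, 3, 4, 5, 6] ++ [7])
          (shellAll [(1, a1), (2, a2), (3, a3), (4, a4), (5, a5), (6, a6)] (rep 7 c)) =
          loopL [7] (rep 7 c) :=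
        loopL_shellAll [(1, a1), (2, a2), (3, a3), (4, a4), (5, a5), (6, a6)] [7] (rep 7 c) 7
          (by simp_all) (head?_rep 7 c pc) (by simp only [List.map_cons, List.map_nil]; decide)
      rw [show ([1, 2, 3, 4, 5, 6, 7] : List Int) = [1, 2, 3, 4, 5, 6] ++ [7] from rfl, this]
      rw [loopL]
      simp only [peel_rep 7 c 0]
      rw [if_neg (by simp; omega)]
      simp [loopL]
    · have hs : L = shellAll [(1, a1), (2, a2), (3, a3), (4, a4), (5, a5), (6, a6)]
          (shell 7 c [x]) := by rw [hL]; rfl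
      rw [hs]
      have : loopL ([1, 2, 3, 4, 5, 6] ++ [7])
          (shellAll [(1, a1), (2, a2), (3, a3), (4, a4), (5, a5), (6, a6)] (shell 7 c [x])) =
          loopL [7] (shell 7 c [x]) :=
        loopL_shellAll [(1, a1), (2, a2), (3, a3), (4, a4), (5, a5), (6, a6)] [7] (shell 7 c [x]) 7
          (by simp_all) (head?_shell 7 c [x] pc) (by simp only [List.map_cons, List.map_nil]; decide)
      rw [show ([1, 2, 3, 4, 5, 6, 7] : List Int) = [1, 2, 3, 4, 5, 6] ++ [7] from rfl, this]
      rw [loopL]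
      simp only [peel_shell 7 c [x] (by simp [hx]) 0]
      rw [if_neg (by simp; omega)]
      simp [loopL]

-- ===== B side =====


def rleFrom : Option Int → List Int → List Int
  | _, [] => []
  | v, x :: xs => if some x = v then rleFrom v xs else x :: rleFrom (some x) xs

lemma foldl_rle : ∀ (L acc : List Int),
    L.foldl (fun acc x => if acc = [] ∨ acc.getLast? ≠ some x then acc ++ [x] else acc) acc =
      acc ++ rleFrom acc.getLast? L := by
  intro L
  induction L with
  | nil => intro acc; simp [rleFrom]
  | cons x xs ih =>
    intro acc
    simp only [List.foldl_cons]
    by_cases hc : acc = [] ∨ acc.getLast? ≠ some x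
    · rw [if_pos hc, ih, List.getLast?_concat, rleFrom]
      have hne : ¬ some x = acc.getLast? := by
        rcases hc with rfl | h
        · simp
        · exact fun h' => h h'.symm
      rw [if_neg hne]
      simp [List.append_assoc]
    · push_neg at hc
      rw [if_neg (by push_neg; exact hc), ih, rleFrom, if_pos hc.2.symm]
  termination_by L => L.length

lemma rleFrom_some : ∀ (L : List Int) (v : Int), rleFrom (some v) L = runValsAux v L := by
  intro L
  induction L with
  | nil => intro v; rfl
  | cons x xs ih =>
    intro v
    rw [rleFrom, runValsAux]
    by_cases h : x = v
    · rw [if_pos (by simp [h]), if_pos h, h, ih]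
    · rw [if_neg (by simp [h]), if_neg h, ih]

lemma rleFrom_none : ∀ L : List Int, rleFrom none L = runVals L := by
  intro L
  cases L with
  | nil => rfl
  | cons x xs => rw [rleFrom, if_neg (by simp), runVals, rleFrom_some]

lemma B_yes_iff_raw (L : List Int) :
    get_rainbow_array_alt L = "yes" ↔ (L.reverse = L ∧ runVals L = [1, 2, 3, 4, 5, 6, 7, 6, 5, 4, 3, 2, 1]) := by
  rw [get_rainbow_array_alt]
  by_cases hp : L = L.reverse
  · rw [if_neg (by simpa using hp)]
    simp only [foldl_rle L [], List.getLast?_nil, rleFrom_none, List.nil_append]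
    by_cases hv : runVals L = [1, 2, 3, 4, 5, 6, 7, 6, 5, 4, 3, 2, 1]
    · simp [hv, hp.symm]
    · simp [hv]
  · rw [if_pos (by simpa using hp)]
    constructor
    · intro h; exact absurd h (by simp)
    · intro ⟨h, _⟩; exact absurd h.symm hp

lemma B_out (L : List Int) :
    get_rainbow_array_alt L = "yes" ∨ get_rainbow_array_alt L = "no" := by
  rw [get_rainbow_array_alt]
  split_ifs <;> simp
  · exact em _

lemma loopL_out : ∀ (is L : List Int), loopL is L = "yes" ∨ loopL is L = "no" := by
  intro is
  induction is with
  | nil => intro L; rw [loopL]; split_ifs <;> simp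
  | cons i rest ih =>
    intro L
    rw [loopL]
    rcases e : peelL i L 0 with ⟨L', k⟩
    by_cases hk : k = 0 <;> simp [hk, ih]

-- ===== runs machinery =====
def runsOf (ps : List (Int × Nat)) : List Int := (ps.map fun p => rep p.1 p.2).flatten

lemma runsOf_cons (v : Int) (n : Nat) (ps : List (Int × Nat)) :
    runsOf ((v, n) :: ps) = rep v n ++ runsOf ps := by simp [runsOf]

lemma runsOf_append (ps qs : List (Int × Nat)) :
    runsOf (ps ++ qs) = runsOf ps ++ runsOf qs := by simp [runsOf]

lemma runsOf_reverse : ∀ ps : List (Int × Nat), (runsOf ps).reverse = runsOf ps.reverse := by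
  intro ps
  induction ps with
  | nil => rfl
  | cons p ps ih =>
    obtain ⟨v, n⟩ := p
    rw [runsOf_cons, List.reverse_append, ih, List.reverse_cons, runsOf_append]
    simp [runsOf]

lemma head?_runsOf_cons (v : Int) (n : Nat) (ps : List (Int × Nat)) (h : 1 ≤ n) :
    (runsOf ((v, n) :: ps)).head? = some v := by
  rw [runsOf_cons]
  cases n with
  | zero => omega
  | succ m => simp [List.replicate_succ]

lemma runValsAux_rep (v : Int) : ∀ (k : Nat) (M : List Int),
    runValsAux v (rep v k ++ M) = runValsAux v M := by
  intro k
  induction k with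
  | zero => intro M; rfl
  | succ m ih =>
    intro M
    show runValsAux v (v :: (rep v m ++ M)) = runValsAux v M
    rw [runValsAux, if_pos rfl]
    exact ih M

lemma runValsAux_of_head_ne (v : Int) (M : List Int) (h : M.head? ≠ some v) :
    runValsAux v M = runVals M := by
  cases M with
  | nil => rfl
  | cons x xs =>
    rw [runValsAux, if_neg (by intro hx; exact h (by simp [hx])), runVals]

lemma runVals_rep_append (v : Int) (n : Nat) (M : List Int) (hn : 1 ≤ n)
    (h : M.head? ≠ some v) : runVals (rep v n ++ M) = v :: runVals M := by
  cases n with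
  | zero => omega
  | succ m =>
    show v :: runValsAux v (rep v m ++ M) = v :: runVals M
    rw [runValsAux_rep, runValsAux_of_head_ne v M h]

lemma runVals_runsOf : ∀ ps : List (Int × Nat), (∀ p ∈ ps, 1 ≤ p.2) →
    List.IsChain (· ≠ ·) (ps.map Prod.fst) →
    runVals (runsOf ps) = ps.map Prod.fst := by
  intro ps
  induction ps with
  | nil => intro _ _; rfl
  | cons p ps ih =>
    intro hpos hch
    obtain ⟨v, n⟩ := p
    rw [runsOf_cons, List.map_cons]
    have hh : (runsOf ps).head? ≠ some v := by
      rcases ps with _ | ⟨⟨w, m⟩, qs⟩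
      · simp [runsOf]
      · rw [head?_runsOf_cons w m qs (hpos (w, m) (by simp))]
        have : v ≠ w := (List.isChain_cons_cons.mp (by simpa using hch)).1
        simpa using fun h => this h.symm
    rw [runVals_rep_append v n _ (hpos (v, n) (by simp)) hh,
      ih (fun q hq => hpos q (by simp [hq])) (List.IsChain.of_cons (by simpa using hch))]

lemma splitAux : ∀ (xs : List Int) (v : Int), ∃ n M, xs = rep v n ++ M ∧
    M.head? ≠ some v ∧ runValsAux v xs = runVals M := by
  intro xs
  induction xs with
  | nil => intro v; exact ⟨0, [], rfl, by simp, rfl⟩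
  | cons x xs ih =>
    intro v
    by_cases h : x = v
    · subst h
      obtain ⟨n, M, h1, h2, h3⟩ := ih x
      refine ⟨n + 1, M, ?_, h2, ?_⟩
      · rw [h1]; rfl
      · rw [runValsAux, if_pos rfl, h3]
    · exact ⟨0, x :: xs, rfl, by simp [h], by rw [runValsAux, if_neg h]; rfl⟩

lemma runVals_split (L : List Int) (v : Int) (vs : List Int)
    (h : runVals L = v :: vs) :
    ∃ n M, 1 ≤ n ∧ L = rep v n ++ M ∧ M.head? ≠ some v ∧ runVals M = vs := by
  cases L with
  | nil => exact absurd h (by simp [runVals])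
  | cons x xs =>
    rw [runVals] at h
    obtain ⟨rfl, hvs⟩ := List.cons.inj h
    obtain ⟨n, M, h1, h2, h3⟩ := splitAux xs x
    exact ⟨n + 1, M, by omega, by rw [h1]; rfl, h2, by rw [← h3, hvs]⟩

lemma runVals_splitAll : ∀ (vs L : List Int), runVals L = vs →
    ∃ ns : List Nat, ns.length = vs.length ∧ (∀ n ∈ ns, 1 ≤ n) ∧ L = runsOf (vs.zip ns) := by
  intro vs
  induction vs with
  | nil =>
    intro L h
    cases L with
    | nil => exact ⟨[], rfl, by simp, rfl⟩
    | cons x xs => exact absurd h (by simp [runVals])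
  | cons v vs ih =>
    intro L h
    obtain ⟨n, M, hn, hL, _, hM⟩ := runVals_split L v vs h
    obtain ⟨ns, hlen, hpos, hMs⟩ := ih M hM
    refine ⟨n :: ns, by simp [hlen], ?_, ?_⟩
    · intro m hm
      rcases List.mem_cons.mp hm with rfl | hm
      · exact hn
      · exact hpos m hm
    · rw [List.zip_cons_cons, runsOf_cons, ← hMs, ← hL]

lemma rep_head_uniq : ∀ (n n' : Nat) (M M' : List Int) (v : Int),
    rep v n ++ M = rep v n' ++ M' → M.head? ≠ some v → M'.head? ≠ some v →
    n = n' ∧ M = M' := by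
  intro n
  induction n with
  | zero =>
    intro n' M M' v h hM hM'
    cases n' with
    | zero => simpa using h
    | succ m =>
      have h' : M = v :: (rep v m ++ M') := by simpa [rep, List.replicate_succ] using h
      exact absurd (by rw [h']; simp : M.head? = some v) hM
  | succ m ih =>
    intro n' M M' v h hM hM'
    cases n' with
    | zero =>
      have h' : M' = v :: (rep v m ++ M) := by
        have := h.symm
        simpa [rep, List.replicate_succ] using this
      exact absurd (by rw [h']; simp : M'.head? = some v) hM'
    | succ m' =>
      simp only [rep, List.replicate_succ, List.cons_append, List.cons.injEq] at h
      obtain ⟨n_eq, M_eq⟩ := ih m' M M' v h.2 hM hM'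
      exact ⟨by omega, M_eq⟩

lemma runsOf_inj : ∀ (ps qs : List (Int × Nat)), (∀ p ∈ ps, 1 ≤ p.2) → (∀ q ∈ qs, 1 ≤ q.2) →
    ps.map Prod.fst = qs.map Prod.fst → List.IsChain (· ≠ ·) (ps.map Prod.fst) →
    runsOf ps = runsOf qs → ps = qs := by
  intro ps
  induction ps with
  | nil =>
    intro qs _ _ hmap _ _
    exact (List.map_eq_nil_iff.mp hmap.symm).symm
  | cons p ps ih =>
    intro qs hpos hqos hmap hch hrun
    obtain ⟨v, n⟩ := p
    cases qs with
    | nil => exact absurd hmap (by simp)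
    | cons q qs' =>
      obtain ⟨w, m⟩ := q
      simp only [List.map_cons, List.cons.injEq] at hmap
      obtain ⟨rfl, hmap'⟩ := hmap
      rw [runsOf_cons, runsOf_cons] at hrun
      have hh1 : (runsOf ps).head? ≠ some v := by
        rcases ps with _ | ⟨⟨v2, n2⟩, ps2⟩
        · simp [runsOf]
        · rw [head?_runsOf_cons v2 n2 ps2 (hpos (v2, n2) (by simp))]
          have : v ≠ v2 := (List.isChain_cons_cons.mp (by simpa using hch)).1
          simpa using fun h => this h.symm
      have hh2 : (runsOf qs').head? ≠ some v := by
        rcases qs' with _ | ⟨⟨w2, m2⟩, qs2⟩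
        · simp [runsOf]
        · rw [head?_runsOf_cons w2 m2 qs2 (hqos (w2, m2) (by simp))]
          rcases ps with _ | ⟨⟨v2, n2⟩, ps2⟩
          · exact absurd hmap' (by simp)
          · have hv2 : v2 = w2 := by simpa using (List.cons.inj hmap').1
            have : v ≠ v2 := (List.isChain_cons_cons.mp (by simpa using hch)).1
            rw [← hv2]
            simpa using fun h => this h.symm
      obtain ⟨rfl, hrest⟩ := rep_head_uniq n m _ _ v hrun hh1 hh2
      rw [ih qs' (fun r hr => hpos r (by simp [hr])) (fun r hr => hqos r (by simp [hr]))
        hmap' (List.IsChain.of_cons (by simpa using hch)) hrest]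

lemma sym_decomp (M : List Int) (hpal : M.reverse = M)
    (hrv : runVals M = [1, 2, 3, 4, 5, 6, 7, 6, 5, 4, 3, 2, 1]) :
    ∃ n1 n2 n3 n4 n5 n6 n7 : Nat,
      (1 ≤ n1 ∧ 1 ≤ n2 ∧ 1 ≤ n3 ∧ 1 ≤ n4 ∧ 1 ≤ n5 ∧ 1 ≤ n6 ∧ 1 ≤ n7) ∧
      M = runsOf [(1, n1), (2, n2), (3, n3), (4, n4), (5, n5), (6, n6), (7, n7),
        (6, n6), (5, n5), (4, n4), (3, n3), (2, n2), (1, n1)] := by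
  obtain ⟨ns, hlen, hpos, hM⟩ := runVals_splitAll _ M hrv
  rcases ns with _|⟨m1,_|⟨m2,_|⟨m3,_|⟨m4,_|⟨m5,_|⟨m6,_|⟨m7,_|⟨m8,_|⟨m9,_|⟨m10,_|⟨m11,_|⟨m12,_|⟨m13,tl⟩⟩⟩⟩⟩⟩⟩⟩⟩⟩⟩⟩⟩ <;> simp at hlen
  subst hlen
  simp only [List.zip_cons_cons, List.zip_nil_right] at hM
  have hrev : ([(1, m1), (2, m2), (3, m3), (4, m4), (5, m5), (6, m6), (7, m7), (6, m8),
      (5, m9), (4, m10), (3, m11), (2, m12), ((1 : Int), m13)]).reverse =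
      [(1, m13), (2, m12), (3, m11), (4, m10), (5, m9), (6, m8), (7, m7), (6, m6),
      (5, m5), (4, m4), (3, m3), (2, m2), (1, m1)] := by rfl
  have hsym : runsOf [(1, m1), (2, m2), (3, m3), (4, m4), (5, m5), (6, m6), (7, m7), (6, m8),
      (5, m9), (4, m10), (3, m11), (2, m12), (1, m13)] =
      runsOf [(1, m13), (2, m12), (3, m11), (4, m10), (5, m9), (6, m8), (7, m7), (6, m6),
      (5, m5), (4, m4), (3, m3), (2, m2), (1, m1)] := by
    rw [← hrev, ← runsOf_reverse, ← hM, hpal, hM]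
  have hcnt1 : ∀ p ∈ [((1:Int), m1), (2, m2), (3, m3), (4, m4), (5, m5), (6, m6), (7, m7), (6, m8), (5, m9), (4, m10), (3, m11), (2, m12), (1, m13)], 1 ≤ p.2 := by
    intro p hp
    simp only [List.mem_cons, List.not_mem_nil, or_false] at hp
    rcases hp with rfl|rfl|rfl|rfl|rfl|rfl|rfl|rfl|rfl|rfl|rfl|rfl|rfl <;> exact hpos _ (by simp)
  have hcnt2 : ∀ p ∈ [((1:Int), m13), (2, m12), (3, m11), (4, m10), (5, m9), (6, m8), (7, m7), (6, m6), (5, m5), (4, m4), (3, m3), (2, m2), (1, m1)], 1 ≤ p.2 := by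
    intro p hp
    simp only [List.mem_cons, List.not_mem_nil, or_false] at hp
    rcases hp with rfl|rfl|rfl|rfl|rfl|rfl|rfl|rfl|rfl|rfl|rfl|rfl|rfl <;> exact hpos _ (by simp)
  have heq := runsOf_inj _ _ hcnt1 hcnt2 (by rfl)
    (by simp only [List.map_cons, List.map_nil]; decide) hsym
  simp only [List.cons.injEq, Prod.mk.injEq, and_true, true_and] at heq
  obtain ⟨e1, e2, e3, e4, e5, e6, e8, e9, e10, e11, e12, e13⟩ := heq
  refine ⟨m1, m2, m3, m4, m5, m6, m7,
    ⟨hpos m1 (by simp), hpos m2 (by simp), hpos m3 (by simp), hpos m4 (by simp),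
     hpos m5 (by simp), hpos m6 (by simp), hpos m7 (by simp)⟩, ?_⟩
  rw [hM]
  congr 1
  simp only [List.cons.injEq, Prod.mk.injEq, and_true, true_and]
  omega

lemma pat_flat (a1 a2 a3 a4 a5 a6 c : Nat) :
    shell 1 a1 (shell 2 a2 (shell 3 a3 (shell 4 a4 (shell 5 a5 (shell 6 a6 (rep 7 c)))))) =
    runsOf [(1, a1), (2, a2), (3, a3), (4, a4), (5, a5), (6, a6), (7, c),
      (6, a6), (5, a5), (4, a4), (3, a3), (2, a2), (1, a1)] := by
  simp [shell, runsOf, List.append_assoc]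

lemma dsh_flat (a1 a2 a3 a4 a5 a6 c : Nat) (x : Int) :
    shell 1 a1 (shell 2 a2 (shell 3 a3 (shell 4 a4 (shell 5 a5 (shell 6 a6 (shell 7 c [x])))))) =
    runsOf [(1, a1), (2, a2), (3, a3), (4, a4), (5, a5), (6, a6), (7, c)] ++ [x] ++
      runsOf [(7, c), (6, a6), (5, a5), (4, a4), (3, a3), (2, a2), (1, a1)] := by
  simp [shell, runsOf, List.append_assoc]

lemma runsOf_nil : runsOf [] = [] := rfl

lemma runVals_runsOf13 (a1 a2 a3 a4 a5 a6 c : Nat)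
    (p1 : 1 ≤ a1) (p2 : 1 ≤ a2) (p3 : 1 ≤ a3) (p4 : 1 ≤ a4) (p5 : 1 ≤ a5) (p6 : 1 ≤ a6)
    (pc : 1 ≤ c) :
    runVals (runsOf [(1, a1), (2, a2), (3, a3), (4, a4), (5, a5), (6, a6), (7, c),
      (6, a6), (5, a5), (4, a4), (3, a3), (2, a2), ((1:Int), a1)]) =
      [1, 2, 3, 4, 5, 6, 7, 6, 5, 4, 3, 2, 1] := by
  have hpos : ∀ p ∈ [((1:Int), a1), (2, a2), (3, a3), (4, a4), (5, a5), (6, a6), (7, c),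
      (6, a6), (5, a5), (4, a4), (3, a3), (2, a2), (1, a1)], 1 ≤ p.2 := by
    intro p hp
    simp only [List.mem_cons, List.not_mem_nil, or_false] at hp
    rcases hp with rfl|rfl|rfl|rfl|rfl|rfl|rfl|rfl|rfl|rfl|rfl|rfl|rfl <;>
      first | exact p1 | exact p2 | exact p3 | exact p4 | exact p5 | exact p6 | exact pc
  have hch : List.IsChain (· ≠ ·) (List.map Prod.fst [((1:Int), a1), (2, a2), (3, a3), (4, a4),
      (5, a5), (6, a6), (7, c), (6, a6), (5, a5), (4, a4), (3, a3), (2, a2), (1, a1)]) := by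
    simp only [List.map_cons, List.map_nil]; decide
  rw [runVals_runsOf _ hpos hch]
  rfl

lemma B_yes_iff_Pat (L : List Int) : get_rainbow_array_alt L = "yes" ↔ Pat L := by
  rw [B_yes_iff_raw]
  constructor
  · intro ⟨hpal, hrv⟩
    obtain ⟨n1, n2, n3, n4, n5, n6, n7, hc, hM⟩ := sym_decomp L hpal hrv
    exact ⟨n1, n2, n3, n4, n5, n6, n7, hc, by rw [pat_flat]; exact hM⟩
  · intro ⟨a1, a2, a3, a4, a5, a6, c, ⟨p1, p2, p3, p4, p5, p6, pc⟩, hL⟩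
    subst hL
    rw [pat_flat]
    refine ⟨?_, runVals_runsOf13 a1 a2 a3 a4 a5 a6 c p1 p2 p3 p4 p5 p6 pc⟩
    rw [runsOf_reverse]
    rfl

lemma Pat_center (L : List Int) (h : Pat L) (hodd : L.length % 2 = 1) :
    L[L.length / 2]? = some 7 := by
  obtain ⟨a1, a2, a3, a4, a5, a6, c, ⟨p1, p2, p3, p4, p5, p6, pc⟩, hL⟩ := h
  have hflat : L = runsOf [(1, a1), (2, a2), (3, a3), (4, a4), (5, a5), (6, a6)] ++
      (rep 7 c ++ runsOf [(6, a6), (5, a5), (4, a4), (3, a3), (2, a2), (1, a1)]) := by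
    rw [hL]; simp [shell, runsOf, List.append_assoc]
  have l1 : (runsOf [((1:Int), a1), (2, a2), (3, a3), (4, a4), (5, a5), (6, a6)]).length =
      a1 + a2 + a3 + a4 + a5 + a6 := by simp [runsOf]; omega
  have l2 : (runsOf [((6:Int), a6), (5, a5), (4, a4), (3, a3), (2, a2), (1, a1)]).length =
      a1 + a2 + a3 + a4 + a5 + a6 := by simp [runsOf]; omega
  have hlen : L.length = 2 * (a1 + a2 + a3 + a4 + a5 + a6) + c := by
    rw [hflat]; simp only [List.length_append, l1, l2, List.length_replicate]; omega
  have hidx : L.length / 2 = a1 + a2 + a3 + a4 + a5 + a6 + c / 2 := by omega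
  rw [hidx, hflat, List.getElem?_append_right (by rw [l1]; omega),
    List.getElem?_append_left (by simp only [List.length_replicate]; rw [l1]; omega),
    List.getElem?_replicate_of_lt (by rw [l1]; omega)]

lemma D_not_Pat (L : List Int) (hD : D_get_rainbow_array L) (hP : Pat L) : False :=
  hD.2.2.1 (Pat_center L hP hD.1)

lemma merge7 (n1 n2 n3 n4 n5 n6 c : Nat) :
    runsOf [(1, n1), (2, n2), (3, n3), (4, n4), (5, n5), (6, n6), (7, c + c),
      (6, n6), (5, n5), (4, n4), (3, n3), (2, n2), ((1:Int), n1)] =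
    runsOf [(1, n1), (2, n2), (3, n3), (4, n4), (5, n5), (6, n6), (7, c)] ++
      runsOf [(7, c), (6, n6), (5, n5), (4, n4), (3, n3), (2, n2), (1, n1)] := by
  rw [← runsOf_append]
  simp only [List.cons_append, List.nil_append, runsOf_cons, runsOf_nil, List.append_nil,
    rep, List.replicate_add, List.append_assoc]

lemma Dsh_imp_D (L : List Int) (h : Dsh L) : D_get_rainbow_array L := by
  obtain ⟨a1, a2, a3, a4, a5, a6, c, x, ⟨p1, p2, p3, p4, p5, p6, pc⟩, hx, hL⟩ := h
  rw [dsh_flat] at hL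
  have hrev : (runsOf [((1:Int), a1), (2, a2), (3, a3), (4, a4), (5, a5), (6, a6), (7, c)]).reverse
      = runsOf [(7, c), (6, a6), (5, a5), (4, a4), (3, a3), (2, a2), (1, a1)] := by
    rw [runsOf_reverse]; rfl
  rw [← hrev] at hL
  set X := runsOf [((1:Int), a1), (2, a2), (3, a3), (4, a4), (5, a5), (6, a6), (7, c)] with hX
  have hlenX : X.length = a1 + a2 + a3 + a4 + a5 + a6 + c := by
    rw [hX]; simp [runsOf]; omega
  have hlen : L.length = 2 * X.length + 1 := by
    rw [hL]; simp; omega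
  have hhalf : L.length / 2 = X.length := by omega
  have ht : ((X ++ [x]) ++ X.reverse).take X.length = X := by
    rw [List.append_assoc]; exact List.take_left' rfl
  have hd : ((X ++ [x]) ++ X.reverse).drop (X.length + 1) = X.reverse :=
    List.drop_left' (by simp)
  refine ⟨by omega, ?_, ?_, ?_⟩
  · rw [hL]; simp [List.reverse_append, List.append_assoc]
  · rw [hhalf, hL, List.append_assoc, List.getElem?_append_right (le_refl _), Nat.sub_self]
    simpa using hx
  · rw [hhalf, hL, ht, hd]
    have hXX : X ++ X.reverse = runsOf [(1, a1), (2, a2), (3, a3), (4, a4), (5, a5), (6, a6),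
        (7, c + c), (6, a6), (5, a5), (4, a4), (3, a3), (2, a2), (1, a1)] := by
      rw [merge7, hrev, hX]
    rw [hXX, runVals_runsOf13 a1 a2 a3 a4 a5 a6 (c + c) p1 p2 p3 p4 p5 p6 (by omega)]

lemma D_imp_Dsh (L : List Int) (h : D_get_rainbow_array L) : Dsh L := by
  obtain ⟨hodd, hpal, hc7, hrv⟩ := h
  have hl : L.length / 2 < L.length := by omega
  have hdrop : L.drop (L.length / 2) = L[L.length / 2]'hl :: L.drop (L.length / 2 + 1) :=
    List.drop_eq_getElem_cons hl
  have hsplit : L = L.take (L.length / 2) ++ (L[L.length / 2]'hl :: L.drop (L.length / 2 + 1)) := by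
    rw [← hdrop, List.take_append_drop]
  set X := L.take (L.length / 2) with hXdef
  set x := L[L.length / 2]'hl with hxdef
  set Y := L.drop (L.length / 2 + 1) with hYdef
  have hlX : X.length = L.length / 2 := by rw [hXdef]; simp; omega
  have hlY : Y.length = L.length / 2 := by rw [hYdef]; simp; omega
  have hrevL : Y.reverse ++ (x :: X.reverse) = X ++ (x :: Y) := by
    have := hpal
    conv_lhs at this => rw [hsplit]
    conv_rhs at this => rw [hsplit]
    simpa [List.reverse_append, List.append_assoc] using this
  obtain ⟨hYX, htail⟩ := List.append_inj hrevL (by simp [hlX, hlY])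
  have hXY : X.reverse = Y := (List.cons.inj htail).2
  have hpalM : (X ++ X.reverse).reverse = X ++ X.reverse := by
    simp [List.reverse_append]
  have hrvM : runVals (X ++ X.reverse) = [1, 2, 3, 4, 5, 6, 7, 6, 5, 4, 3, 2, 1] := by
    rw [hXY]; exact hrv
  obtain ⟨n1, n2, n3, n4, n5, n6, n7, ⟨q1, q2, q3, q4, q5, q6, q7⟩, hM⟩ :=
    sym_decomp (X ++ X.reverse) hpalM hrvM
  have hlenM : 2 * X.length = n1 + n2 + n3 + n4 + n5 + n6 + n7 + n6 + n5 + n4 + n3 + n2 + n1 := by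
    have := congrArg List.length hM
    simp [runsOf] at this
    omega
  set c := n7 / 2 with hcdef
  have hc2 : n7 = c + c := by omega
  rw [hc2] at hM
  rw [merge7 n1 n2 n3 n4 n5 n6 c] at hM
  have hXr : X = runsOf [(1, n1), (2, n2), (3, n3), (4, n4), (5, n5), (6, n6), (7, c)] := by
    have hlen1 : X.length =
        (runsOf [((1:Int), n1), (2, n2), (3, n3), (4, n4), (5, n5), (6, n6), (7, c)]).length := by
      simp [runsOf]; omega
    exact (List.append_inj hM hlen1).1
  have hx7 : x ≠ 7 := by
    intro hxx
    exact hc7 (by rw [List.getElem?_eq_getElem hl, ← hxdef, hxx])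
  refine ⟨n1, n2, n3, n4, n5, n6, c, x, ⟨q1, q2, q3, q4, q5, q6, by omega⟩, hx7, ?_⟩
  rw [dsh_flat, hsplit, hXr]
  have hrev2 : (runsOf [((1:Int), n1), (2, n2), (3, n3), (4, n4), (5, n5), (6, n6), (7, c)]).reverse
      = runsOf [(7, c), (6, n6), (5, n5), (4, n4), (3, n3), (2, n2), (1, n1)] := by
    rw [runsOf_reverse]; rfl
  rw [← hXY, hXr, hrev2]
  simp [List.append_assoc]

-- ===== final assembly =====
lemma unchanged_main (L : List Int) (hND : ¬ D_get_rainbow_array L) :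
    get_rainbow_array L = get_rainbow_array_alt L := by
  have hA := A_eq_loopL L
  rcases loopL_out [1, 2, 3, 4, 5, 6, 7] L with hyes | hno
  · rcases (A_yes_iff L).mp hyes with hPat | hDsh
    · rw [hA, hyes, ((B_yes_iff_Pat L).mpr hPat).symm]
    · exact absurd (Dsh_imp_D L hDsh) hND
  · rw [hA, hno]
    rcases B_out L with hB | hB
    · have := (A_yes_iff L).mpr (Or.inl ((B_yes_iff_Pat L).mp hB))
      rw [this] at hno
      exact absurd hno (by simp)
    · rw [hB]

lemma tight_main (L : List Int) (hD : D_get_rainbow_array L) :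
    get_rainbow_array L ≠ get_rainbow_array_alt L := by
  have hA : get_rainbow_array L = "yes" := by
    rw [A_eq_loopL]
    exact (A_yes_iff L).mpr (Or.inr (D_imp_Dsh L hD))
  have hB : get_rainbow_array_alt L = "no" := by
    rcases B_out L with hB | hB
    · exact absurd ((B_yes_iff_Pat L).mp hB) (fun hP => D_not_Pat L hD hP)
    · exact hB
  rw [hA, hB]
  simp

-- ===== VERDICT (by name: the statement is the Claim_ definition above) =====
theorem get_rainbow_array_spec : Claim_unchanged_get_rainbow_array := by
  intro array _ hND
  exact unchanged_main array hND

theorem get_rainbow_array_changed : Claim_changed_get_rainbow_array := by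
  unfold Claim_changed_get_rainbow_array
  refine ⟨by decide, by decide, ?_, by decide, by decide⟩
  show get_rainbow_array pvDiffWitness_get_rainbow_array = "yes"
  rw [A_eq_loopL]
  exact (A_yes_iff _).mpr (Or.inr (D_imp_Dsh _ (by decide)))

theorem get_rainbow_array_tight : Claim_exact_get_rainbow_array := by
  intro array _ hD
  exact tight_main array hD
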